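-- pv_equiv track=rewrite | github.com/Lam-Hung-ai/xlsr-english-l2 | core/logic.py | arpabet2ipa
-- ===== SOURCE A (Python) =====
-- ARPABET2IPA = {
--     'AA':'ɑ','AE':'æ','AH':'ʌ','AO':'ɔ','IX':'ɨ','AW':'aʊ','AX':'ə','AXR':'ɚ','AY':'aɪ',
--     'EH':'ɛ','ER':'ɝ','EY':'eɪ','IH':'ɪ','IY':'i','OW':'oʊ','OY':'ɔɪ','UH':'ʊ','UW':'u',
--     'UX':'ʉ','B':'b','CH':'tʃ','D':'d','DH':'ð','EL':'l̩','EM':'m̩','EN':'n̩','F':'f',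
--     'G':'ɡ','HH':'h','H':'h','JH':'dʒ','K':'k','L':'l','M':'m','N':'n','NG':'ŋ',
--     'NX':'ɾ̃','P':'p','Q':'ʔ','R':'ɹ','S':'s','SH':'ʃ','T':'t','TH':'θ','V':'v',
--     'W':'w','WH':'ʍ','Y':'j','Z':'z','ZH':'ʒ','DX':'ɾ'
-- }
--
-- ENGLISH_STRESS = { '0':'', '1':'ˈ', '2':'ˌ' }
--
-- def string2symbols(string, symbols):
--     """
--     Tách chuỗi ARPABET thành danh sách các ký hiệu hợp lệ.
--     Ví dụ: "BAET" -> ["B", "AE", "T"]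
--     """
--     N = len(string)
--     oovcost = len(string)
--     maxsym = max(len(k) for k in symbols)
--     lattice = [(0, 0, "", True)]
--
--     for n in range(1, N + 1):
--         lattice.append((oovcost + lattice[n - 1][0], n - 1, string[(n - 1) : n], False))
--         for m in range(1, min(n + 1, maxsym + 1)):
--             if string[(n - m) : n] in symbols and 1 + lattice[n - m][0] < lattice[n][0]:
--                 lattice[n] = (1 + lattice[n - m][0], n - m, string[(n - m) : n], True)
--
--     tl = []
--     n = N
--     while n > 0:
--         tl.append(lattice[n][2])
--         n = lattice[n][1]
--     return tl[::-1]
--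
-- def arpabet2ipa(arpabet_string, get_stress=False):
--     """
--     Chuyển đổi chuỗi ARPABET sang IPA.
--     Hỗ trợ cả chuỗi có dấu cách (B AE1 T) hoặc dính liền (BAET).
--     """
--     # Tạo từ điển đầy đủ bao gồm cả trọng âm
--     full_mapping = ARPABET2IPA.copy()
--     full_mapping.update(ENGLISH_STRESS)
--
--     # Tách các ký hiệu (tokens)
--     if " " in arpabet_string:
--         arpabet_symbols = arpabet_string.split()
--     else:
--         arpabet_symbols = string2symbols(arpabet_string.upper(), full_mapping.keys())
--
--     # Chuyển đổi từng ký hiệu sang IPA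
--     res = ""
--     for sym in arpabet_symbols:
--         # Xử lý trường hợp ký hiệu có kèm số trọng âm (vd: AE1, AH0)
--         main_sym = sym
--         stress = ""
--         if len(sym) > 1 and sym[-1].isdigit():
--             main_sym = sym[:-1]
--             stress = ENGLISH_STRESS.get(sym[-1], "")
--
--         # Lấy giá trị IPA, nếu không có thì giữ nguyên ký hiệu gốc
--         ipa_val = ARPABET2IPA.get(main_sym, main_sym)
--         if get_stress:
--             res += stress + ipa_val
--         else:
--             res += ipa_val
--
--     return res
-- ===== SOURCE B (Python) =====
-- ARPABET2IPA = {
--     'AA':'ɑ','AE':'æ','AH':'ʌ','AO':'ɔ','IX':'ɨ','AW':'aʊ','AX':'ə','AXR':'ɚ','AY':'aɪ',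
--     'EH':'ɛ','ER':'ɝ','EY':'eɪ','IH':'ɪ','IY':'i','OW':'oʊ','OY':'ɔɪ','UH':'ʊ','UW':'u',
--     'UX':'ʉ','B':'b','CH':'tʃ','D':'d','DH':'ð','EL':'l̩','EM':'m̩','EN':'n̩','F':'f',
--     'G':'ɡ','HH':'h','H':'h','JH':'dʒ','K':'k','L':'l','M':'m','N':'n','NG':'ŋ',
--     'NX':'ɾ̃','P':'p','Q':'ʔ','R':'ɹ','S':'s','SH':'ʃ','T':'t','TH':'θ','V':'v',
--     'W':'w','WH':'ʍ','Y':'j','Z':'z','ZH':'ʒ','DX':'ɾ'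
-- }
--
-- ENGLISH_STRESS = { '0':'', '1':'ˈ', '2':'ˌ' }
--
-- _SYMBOLS = frozenset(ARPABET2IPA) | frozenset(ENGLISH_STRESS)
-- _MAXLEN = 3   # longest symbol key
--
-- def _costs(s):
--     """Forward pass computing only the optimal cost of each prefix (cost model:
--     1 per recognised symbol, len(s) per OOV character); no backpointers and no
--     per-position decision tuples are stored."""
--     N = len(s)
--     dist = [0]
--     for n in range(1, N + 1):
--         dist.append(min([N + dist[n - 1]] +
--                         [1 + dist[n - m] for m in range(1, min(n, _MAXLEN) + 1)
--                          if s[n - m:n] in _SYMBOLS]))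
--     return dist
--
-- def _traceback(s, dist):
--     """Viterbi-style traceback without backpointers: at each position the taken
--     piece is re-derived from the cost table alone — an OOV character unless some
--     symbol strictly beats it, in which case the shortest symbol whose cost
--     matches the optimum (the lattice's tie-breaking rule)."""
--     N = len(s)
--     out = []
--     n = N
--     while n > 0:
--         m = 1
--         if dist[n] < N + dist[n - 1]:
--             m = next(k for k in range(1, min(n, _MAXLEN) + 1)
--                      if s[n - k:n] in _SYMBOLS and 1 + dist[n - k] == dist[n])
--         out.append(s[n - m:n])
--         n -= m
--     return out[::-1]
--
-- def _convert(sym, get_stress):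
--     main_sym = sym
--     stress = ""
--     if len(sym) > 1 and sym[-1].isdigit():
--         main_sym = sym[:-1]
--         stress = ENGLISH_STRESS.get(sym[-1], "")
--     ipa_val = ARPABET2IPA.get(main_sym, main_sym)
--     return stress + ipa_val if get_stress else ipa_val
--
-- def arpabet2ipa(arpabet_string, get_stress=False):
--     if " " in arpabet_string:
--         toks = arpabet_string.split()
--     else:
--         u = arpabet_string.upper()
--         toks = _traceback(u, _costs(u))
--     return "".join(_convert(t, get_stress) for t in toks)
-- ===== Notes on version B (the rewrite author's own statement) =====
-- stated objective: alternative
-- what changed: string2symbols's lattice of (cost, backpointer, piece, flag) tuples with stored-backpointer reconstruction is replaced by a two-stage Viterbi-without-backpointers scheme: a forward pass computes a bare integer cost table only, and the segmentation is then re-derived backward from the costs alone, choosing the OOV character unless a symbol strictly beats it and otherwise the shortest symbol whose cost matches the optimum (the lattice's tie rule); the token-to-IPA step becomes a mapped helper joined with str.join instead of string accumulation.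
import Mathlib
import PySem

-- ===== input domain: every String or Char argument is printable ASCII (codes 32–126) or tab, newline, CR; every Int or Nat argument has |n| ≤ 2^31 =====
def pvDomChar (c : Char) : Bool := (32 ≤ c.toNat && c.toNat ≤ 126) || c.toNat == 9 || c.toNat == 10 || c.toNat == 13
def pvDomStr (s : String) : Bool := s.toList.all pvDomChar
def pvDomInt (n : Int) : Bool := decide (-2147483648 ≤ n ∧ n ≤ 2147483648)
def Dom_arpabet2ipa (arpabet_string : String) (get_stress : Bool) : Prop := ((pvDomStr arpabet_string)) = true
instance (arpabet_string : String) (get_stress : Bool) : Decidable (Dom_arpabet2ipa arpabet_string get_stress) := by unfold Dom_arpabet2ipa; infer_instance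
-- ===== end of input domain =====

-- B replaces string2symbols's lattice of (cost, backpointer, piece, flag) tuples and its
-- stored-backpointer reconstruction by a two-stage scheme: a forward pass computing a bare
-- integer cost table, then a backward traceback that re-derives each taken piece from the
-- costs alone (alternative decomposition, same results).

-- ===== PORT A =====
-- module constants (shared by both Pythons)
def pvARPABET2IPA : PySem.Dict String String := PySem.Dict.ofList [
  ("AA","ɑ"),("AE","æ"),("AH","ʌ"),("AO","ɔ"),("IX","ɨ"),("AW","aʊ"),("AX","ə"),("AXR","ɚ"),("AY","aɪ"),
  ("EH","ɛ"),("ER","ɝ"),("EY","eɪ"),("IH","ɪ"),("IY","i"),("OW","oʊ"),("OY","ɔɪ"),("UH","ʊ"),("UW","u"),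
  ("UX","ʉ"),("B","b"),("CH","tʃ"),("D","d"),("DH","ð"),("EL","l̩"),("EM","m̩"),("EN","n̩"),("F","f"),
  ("G","ɡ"),("HH","h"),("H","h"),("JH","dʒ"),("K","k"),("L","l"),("M","m"),("N","n"),("NG","ŋ"),
  ("NX","ɾ̃"),("P","p"),("Q","ʔ"),("R","ɹ"),("S","s"),("SH","ʃ"),("T","t"),("TH","θ"),("V","v"),
  ("W","w"),("WH","ʍ"),("Y","j"),("Z","z"),("ZH","ʒ"),("DX","ɾ")]
def pvENGLISH_STRESS : PySem.Dict String String := PySem.Dict.ofList [("0",""),("1","ˈ"),("2","ˌ")]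

def pvE4d : Int × Int × String × Bool := (0, 0, "", true)

-- full_mapping = ARPABET2IPA.copy(); full_mapping.update(ENGLISH_STRESS)
def pvFullMapping : PySem.Dict String String :=
  pvENGLISH_STRESS.items.foldl (fun d kv => d.insert kv.1 kv.2) pvARPABET2IPA

-- the 'while n > 0' backtrace; fuel = len(string)+1 suffices because every backpointer
-- written into the lattice is strictly smaller than its index
def pvBacktrace (lat : List (Int × Int × String × Bool)) : Nat → Int → List String
  | 0, _ => []
  | fuel + 1, n =>
    if 0 < n then
      (PySem.List.pyGetD lat n pvE4d).2.2.1 ::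
        pvBacktrace lat fuel (PySem.List.pyGetD lat n pvE4d).2.1
    else []

def pvString2symbols (string : String) (symbols : List String) : List String :=
  let cs := string.toList
  let N : Int := PySem.Str.len string
  let oovcost : Int := PySem.Str.len string
  -- max(len(k) for k in symbols); '.getD 0' is unreachable: A only calls this with the
  -- (nonempty) full_mapping key list
  let maxsym : Int := (PySem.List.max? (symbols.map (fun k => PySem.Str.len k)) (fun x => x)).getD 0
  let lat : List (Int × Int × String × Bool) :=
    (PySem.List.pyRange 1 (N + 1) 1).foldl (fun lat n =>
      let lat := lat ++ [(oovcost + (PySem.List.pyGetD lat (n - 1) pvE4d).1, n - 1,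
                          String.ofList (PySem.List.slice cs (some (n - 1)) (some n)), false)]
      (PySem.List.pyRange 1 (min (n + 1) (maxsym + 1)) 1).foldl (fun lat m =>
        if pvFullMapping.keys.contains (String.ofList (PySem.List.slice cs (some (n - m)) (some n)))
            ∧ 1 + (PySem.List.pyGetD lat (n - m) pvE4d).1 < (PySem.List.pyGetD lat n pvE4d).1 then
          PySem.List.pySetD lat n
            (1 + (PySem.List.pyGetD lat (n - m) pvE4d).1, n - m,
             String.ofList (PySem.List.slice cs (some (n - m)) (some n)), true)
        else lat) lat) [(0, 0, "", true)]
  -- tl[::-1] is List.reverse (PySem.List.slice?_none_none_neg_one)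
  (pvBacktrace lat (cs.length + 1) N).reverse

def arpabet2ipa (arpabet_string : String) (get_stress : Bool) : String :=
  let arpabet_symbols :=
    if PySem.Str.isIn " " arpabet_string then PySem.Str.split₀ arpabet_string
    else pvString2symbols (PySem.Str.upper arpabet_string) pvFullMapping.keys
  arpabet_symbols.foldl (fun res sym =>
    let csym := sym.toList
    let p :=
      if (1 : Int) < PySem.Str.len sym ∧ PySem.Chars.isdigit (PySem.List.pyGetD csym (-1) ' ') then
        (String.ofList (PySem.List.slice csym none (some (-1))),
         PySem.Dict.getD pvENGLISH_STRESS (String.ofList [PySem.List.pyGetD csym (-1) ' ']) "")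
      else (sym, "")
    let ipa_val := PySem.Dict.getD pvARPABET2IPA p.1 p.1
    if get_stress then res ++ (p.2 ++ ipa_val) else res ++ ipa_val) ""

-- ===== PORT B =====
-- _SYMBOLS = frozenset(ARPABET2IPA) | frozenset(ENGLISH_STRESS)
def pvSYMBOLS : PySem.Set String :=
  PySem.Set.union (PySem.Set.ofList pvARPABET2IPA.keys) (PySem.Set.ofList pvENGLISH_STRESS.keys)

-- _costs: forward pass computing only the cost table (no backpointers, no tuples)
def pvCosts (s : String) : List Int :=
  let cs := s.toList
  let N : Int := PySem.Str.len s
  (PySem.List.pyRange 1 (N + 1) 1).foldl (fun dist n =>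
    dist ++ [(PySem.List.min?
      ((N + PySem.List.pyGetD dist (n - 1) 0) ::
        (PySem.List.pyRange 1 (min n 3 + 1) 1).filterMap (fun m =>
          if PySem.Set.contains pvSYMBOLS (String.ofList (PySem.List.slice cs (some (n - m)) (some n)))
          then some (1 + PySem.List.pyGetD dist (n - m) 0) else none))
      (fun x => x)).getD 0]) [0]

-- _traceback's 'while n > 0' loop; 'next(...)' is find?; '.getD 1' is unreachable (the optimum
-- strictly beats the OOV default only via some symbol candidate, so the generator always yields)
def pvTraceback (cs : List Char) (dist : List Int) (N : Int) : Nat → Int → List String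
  | 0, _ => []
  | fuel + 1, n =>
    if 0 < n then
      let m : Int :=
        if PySem.List.pyGetD dist n 0 < N + PySem.List.pyGetD dist (n - 1) 0 then
          ((PySem.List.pyRange 1 (min n 3 + 1) 1).find? (fun k =>
            PySem.Set.contains pvSYMBOLS (String.ofList (PySem.List.slice cs (some (n - k)) (some n)))
            && (1 + PySem.List.pyGetD dist (n - k) 0 == PySem.List.pyGetD dist n 0))).getD 1
        else 1
      String.ofList (PySem.List.slice cs (some (n - m)) (some n)) ::
        pvTraceback cs dist N fuel (n - m)
    else []

def pvSegmentB (s : String) : List String :=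
  let dist := pvCosts s
  -- out[::-1] is List.reverse (PySem.List.slice?_none_none_neg_one)
  (pvTraceback s.toList dist (PySem.Str.len s) (s.toList.length + 1) (PySem.Str.len s)).reverse

def pvConvert (sym : String) (get_stress : Bool) : String :=
  let csym := sym.toList
  let p :=
    if (1 : Int) < PySem.Str.len sym ∧ PySem.Chars.isdigit (PySem.List.pyGetD csym (-1) ' ') then
      (String.ofList (PySem.List.slice csym none (some (-1))),
       PySem.Dict.getD pvENGLISH_STRESS (String.ofList [PySem.List.pyGetD csym (-1) ' ']) "")
    else (sym, "")
  let ipa_val := PySem.Dict.getD pvARPABET2IPA p.1 p.1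
  if get_stress then p.2 ++ ipa_val else ipa_val

def arpabet2ipa_alt (arpabet_string : String) (get_stress : Bool) : String :=
  let toks :=
    if PySem.Str.isIn " " arpabet_string then PySem.Str.split₀ arpabet_string
    else pvSegmentB (PySem.Str.upper arpabet_string)
  PySem.Str.join "" (toks.map (fun sym => pvConvert sym get_stress))

-- ===== PRECONDITION & SPEC =====
def Spec_arpabet2ipa (arpabet_string : String) (get_stress : Bool) (out : String) : Prop := out = arpabet2ipa_alt arpabet_string get_stress
instance (arpabet_string : String) (get_stress : Bool) (out : String) : Decidable (Spec_arpabet2ipa arpabet_string get_stress out) := by unfold Spec_arpabet2ipa; infer_instance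

-- ===== CLAIM (what is proved, stated in full; the proofs are below) =====
def Claim_equal_arpabet2ipa : Prop := ∀ (arpabet_string : String) (get_stress : Bool), Dom_arpabet2ipa arpabet_string get_stress → Spec_arpabet2ipa arpabet_string get_stress (arpabet2ipa arpabet_string get_stress)

-- ===== LEMMAS AND PROOFS =====

-- conversion/join glue (identical token-to-IPA maps on both sides)
theorem pv_intercalate_nil (l : List (List Char)) : List.intercalate [] l = l.flatten := by
  induction l with
  | nil => rfl
  | cons a t ih =>
    cases t with
    | nil => simp [List.intercalate]
    | cons b u =>
      simp only [List.intercalate, List.intersperse] at *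
      simp_all

theorem pv_join_cons (x : String) (xs : List String) :
    PySem.Str.join "" (x :: xs) = x ++ PySem.Str.join "" xs := by
  apply String.toList_inj.mp
  have he : ("" : String).toList = [] := rfl
  simp only [PySem.Str.join, String.toList_append, String.toList_ofList, List.map_cons,
    PySem.Chars.join, he, pv_intercalate_nil, List.flatten_cons]

theorem pv_fold_append (f : String → String) :
    ∀ (l : List String) (init : String),
      l.foldl (fun r x => r ++ f x) init = init ++ PySem.Str.join "" (l.map f) := by
  intro l
  induction l with
  | nil => intro init; apply String.toList_inj.mp; simp [PySem.Str.join]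
  | cons a t ih =>
    intro init
    simp only [List.foldl, List.map, ih, pv_join_cons]
    apply String.toList_inj.mp
    simp

theorem pv_conv_fold (l : List String) (gs : Bool) :
    l.foldl (fun res sym =>
      let csym := sym.toList
      let p :=
        if (1 : Int) < PySem.Str.len sym ∧ PySem.Chars.isdigit (PySem.List.pyGetD csym (-1) ' ') then
          (String.ofList (PySem.List.slice csym none (some (-1))),
           PySem.Dict.getD pvENGLISH_STRESS (String.ofList [PySem.List.pyGetD csym (-1) ' ']) "")
        else (sym, "")
      let ipa_val := PySem.Dict.getD pvARPABET2IPA p.1 p.1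
      if gs then res ++ (p.2 ++ ipa_val) else res ++ ipa_val) "" =
    PySem.Str.join "" (l.map (fun sym => pvConvert sym gs)) := by
  have hb : (fun (res : String) (sym : String) =>
      let csym := sym.toList
      let p :=
        if (1 : Int) < PySem.Str.len sym ∧ PySem.Chars.isdigit (PySem.List.pyGetD csym (-1) ' ') then
          (String.ofList (PySem.List.slice csym none (some (-1))),
           PySem.Dict.getD pvENGLISH_STRESS (String.ofList [PySem.List.pyGetD csym (-1) ' ']) "")
        else (sym, "")
      let ipa_val := PySem.Dict.getD pvARPABET2IPA p.1 p.1
      if gs then res ++ (p.2 ++ ipa_val) else res ++ ipa_val)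
      = fun res sym => res ++ pvConvert sym gs := by
    funext r sym; cases gs <;> rfl
  rw [hb, pv_fold_append]
  apply String.toList_inj.mp
  simp

-- the two symbol inventories coincide
set_option maxRecDepth 100000 in
theorem pv_keys_eq : (pvSYMBOLS : List String) = pvFullMapping.keys := by decide

set_option maxRecDepth 100000 in
theorem pv_contains_eq (x : String) :
    PySem.Set.contains pvSYMBOLS x = pvFullMapping.keys.contains x := by
  show List.contains (pvSYMBOLS : List String) x = _
  rw [pv_keys_eq]

set_option maxRecDepth 100000 in
theorem pv_maxsym_eq :
    (PySem.List.max? (pvFullMapping.keys.map (fun k => PySem.Str.len k)) (fun x => x)).getD 0 = 3 := by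
  decide

theorem pv_find?_congr {α : Type} (l : List α) (p q : α → Bool) (h : ∀ x ∈ l, p x = q x) :
    l.find? p = l.find? q := by
  induction l with
  | nil => rfl
  | cons a t ih =>
    rw [List.find?_cons, List.find?_cons, h a (List.mem_cons_self)]
    cases q a with
    | true => rfl
    | false => exact ih (fun x hx => h x (List.mem_cons_of_mem _ hx))

theorem pv_pySetD_last {α : Type} (xs : List α) (x v : α) :
    PySem.List.pySetD (xs ++ [x]) (xs.length : Int) v = xs ++ [v] := by
  simp [PySem.List.pySetD, PySem.List.pySet?, PySem.List.pyIdx?]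

-- A's inner update and outer step, as named functions (definitionally the port's lambdas)
def pvInnerA (cs : List Char) (n : Int) (lat : List (Int × Int × String × Bool)) (m : Int) :
    List (Int × Int × String × Bool) :=
  if pvFullMapping.keys.contains (String.ofList (PySem.List.slice cs (some (n - m)) (some n)))
      ∧ 1 + (PySem.List.pyGetD lat (n - m) pvE4d).1 < (PySem.List.pyGetD lat n pvE4d).1 then
    PySem.List.pySetD lat n
      (1 + (PySem.List.pyGetD lat (n - m) pvE4d).1, n - m,
       String.ofList (PySem.List.slice cs (some (n - m)) (some n)), true)
  else lat

def pvStepA (cs : List Char) (oov : Int) (lat : List (Int × Int × String × Bool)) (n : Int) :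
    List (Int × Int × String × Bool) :=
  (PySem.List.pyRange 1 (min (n + 1) (3 + 1)) 1).foldl (pvInnerA cs n)
    (lat ++ [(oov + (PySem.List.pyGetD lat (n - 1) pvE4d).1, n - 1,
              String.ofList (PySem.List.slice cs (some (n - 1)) (some n)), false)])

-- B's cost step, as a named function (definitionally the port's lambda)
def pvStepD (cs : List Char) (N : Int) (dist : List Int) (n : Int) : List Int :=
  dist ++ [(PySem.List.min?
    ((N + PySem.List.pyGetD dist (n - 1) 0) ::
      (PySem.List.pyRange 1 (min n 3 + 1) 1).filterMap (fun m =>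
        if PySem.Set.contains pvSYMBOLS (String.ofList (PySem.List.slice cs (some (n - m)) (some n)))
        then some (1 + PySem.List.pyGetD dist (n - m) 0) else none))
    (fun x => x)).getD 0]

-- the inner fold's effect on the single updatable entry, abstracted over a pure cost function C
def pvEntStep (cs : List Char) (C : Int → Int) (n : Int) (e : Int × Int × String × Bool) (m : Int) :
    Int × Int × String × Bool :=
  if pvFullMapping.keys.contains (String.ofList (PySem.List.slice cs (some (n - m)) (some n)))
      ∧ 1 + C (n - m) < e.1 then
    (1 + C (n - m), n - m, String.ofList (PySem.List.slice cs (some (n - m)) (some n)), true)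
  else e

def pvC (lat : List (Int × Int × String × Bool)) : Int → Int :=
  fun i => (PySem.List.pyGetD lat i pvE4d).1

-- plumbing: A's inner fold only ever rewrites the appended last entry
theorem pv_plumb (cs : List Char) (lat : List (Int × Int × String × Bool)) (n : Nat)
    (hlen : lat.length = n) :
    ∀ (ms : List Int), (∀ m ∈ ms, 1 ≤ m ∧ m ≤ (n : Int)) →
      ∀ e, ms.foldl (pvInnerA cs (n : Int)) (lat ++ [e])
        = lat ++ [ms.foldl (pvEntStep cs (pvC lat) (n : Int)) e] := by
  intro ms
  induction ms with
  | nil => intro _ e; rfl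
  | cons m t ih =>
    intro hms e
    obtain ⟨hm1, hmn⟩ := hms m List.mem_cons_self
    have hread : PySem.List.pyGetD (lat ++ [e]) ((n : Int) - m) pvE4d
        = PySem.List.pyGetD lat ((n : Int) - m) pvE4d := by
      rw [show (n : Int) - m = ((n - m.toNat : Nat) : Int) by omega,
        PySem.List.pyGetD_natCast, PySem.List.pyGetD_natCast,
        List.getD_append _ _ _ _ (by omega)]
    have hreadn : PySem.List.pyGetD (lat ++ [e]) (n : Int) pvE4d = e := by
      rw [PySem.List.pyGetD_natCast, List.getD_append_right _ _ _ _ (by omega)]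
      simp [hlen]
    have hset : ∀ v, PySem.List.pySetD (lat ++ [e]) (n : Int) v = lat ++ [v] := by
      intro v
      rw [show ((n : Nat) : Int) = ((lat.length : Nat) : Int) by rw [hlen], pv_pySetD_last]
    rw [List.foldl_cons, List.foldl_cons]
    by_cases hc : pvFullMapping.keys.contains
        (String.ofList (PySem.List.slice cs (some ((n : Int) - m)) (some (n : Int)))) = true
        ∧ 1 + (PySem.List.pyGetD lat ((n : Int) - m) pvE4d).1 < e.1
    · have hA : pvInnerA cs (n : Int) (lat ++ [e]) m
          = lat ++ [(1 + (PySem.List.pyGetD lat ((n : Int) - m) pvE4d).1, (n : Int) - m,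
              String.ofList (PySem.List.slice cs (some ((n : Int) - m)) (some (n : Int))), true)] := by
        simp only [pvInnerA, hread, hreadn, hc, and_self, if_true, hset]
      have hB : pvEntStep cs (pvC lat) (n : Int) e m
          = (1 + (PySem.List.pyGetD lat ((n : Int) - m) pvE4d).1, (n : Int) - m,
             String.ofList (PySem.List.slice cs (some ((n : Int) - m)) (some (n : Int))), true) := by
        simp only [pvEntStep, pvC, hc, and_self, if_true]
      rw [hA, hB, ih (fun x hx => hms x (List.mem_cons_of_mem _ hx))]
    · have hA : pvInnerA cs (n : Int) (lat ++ [e]) m = lat ++ [e] := by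
        simp only [pvInnerA, hread, hreadn]
        rw [if_neg]; exact fun h => hc ⟨h.1, h.2⟩
      have hB : pvEntStep cs (pvC lat) (n : Int) e m = e := by
        simp only [pvEntStep, pvC]
        rw [if_neg]; exact fun h => hc ⟨h.1, h.2⟩
      rw [hA, hB, ih (fun x hx => hms x (List.mem_cons_of_mem _ hx))]

-- cost of the folded entry = running min over the accepted candidates
theorem pv_ent_cost (cs : List Char) (C : Int → Int) (n : Int) :
    ∀ (ms : List Int) (e : Int × Int × String × Bool),
      (ms.foldl (pvEntStep cs C n) e).1
        = (ms.filterMap (fun m =>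
            if pvFullMapping.keys.contains (String.ofList (PySem.List.slice cs (some (n - m)) (some n)))
            then some (1 + C (n - m)) else none)).foldl min e.1 := by
  intro ms
  induction ms with
  | nil => intro e; rfl
  | cons m t ih =>
    intro e
    rw [List.foldl_cons, List.filterMap_cons]
    by_cases hok : pvFullMapping.keys.contains
        (String.ofList (PySem.List.slice cs (some (n - m)) (some n))) = true
    · rw [if_pos hok, List.foldl_cons, ih]
      have hstep : (pvEntStep cs C n e m).1 = min e.1 (1 + C (n - m)) := by
        unfold pvEntStep
        by_cases hlt : 1 + C (n - m) < e.1
        · rw [if_pos ⟨hok, hlt⟩]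
          show 1 + C (n - m) = _
          omega
        · rw [if_neg (fun h => hlt h.2)]
          omega
      rw [hstep]
    · rw [if_neg hok]
      have hstep : pvEntStep cs C n e m = e := by
        unfold pvEntStep
        exact if_neg (fun h => hok h.1)
      rw [hstep, ih]

-- full characterisation of the folded entry: either nothing beat the default, or the entry is
-- the first candidate attaining the strict minimum (A's tie rule), which find? recovers
theorem pv_ent_char (cs : List Char) (C : Int → Int) (n : Int) :
    ∀ (ms : List Int) (e : Int × Int × String × Bool),
      (ms.foldl (pvEntStep cs C n) e = e ∧
        ∀ m ∈ ms, pvFullMapping.keys.contains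
          (String.ofList (PySem.List.slice cs (some (n - m)) (some n))) = true →
          e.1 ≤ 1 + C (n - m))
      ∨ (∃ m', m' ∈ ms ∧
          pvFullMapping.keys.contains
            (String.ofList (PySem.List.slice cs (some (n - m')) (some n))) = true ∧
          ms.foldl (pvEntStep cs C n) e
            = (1 + C (n - m'), n - m',
               String.ofList (PySem.List.slice cs (some (n - m')) (some n)), true) ∧
          1 + C (n - m') < e.1 ∧
          (∀ m ∈ ms, pvFullMapping.keys.contains
            (String.ofList (PySem.List.slice cs (some (n - m)) (some n))) = true →
            1 + C (n - m') ≤ 1 + C (n - m)) ∧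
          ms.find? (fun k =>
            pvFullMapping.keys.contains (String.ofList (PySem.List.slice cs (some (n - k)) (some n)))
            && (1 + C (n - k) == 1 + C (n - m'))) = some m') := by
  intro ms
  induction ms with
  | nil => intro e; left; exact ⟨rfl, by simp⟩
  | cons m t ih =>
    intro e
    by_cases hc : pvFullMapping.keys.contains
        (String.ofList (PySem.List.slice cs (some (n - m)) (some n))) = true
        ∧ 1 + C (n - m) < e.1
    · obtain ⟨hok, hlt⟩ := hc
      have hstep : pvEntStep cs C n e m
          = (1 + C (n - m), n - m,
             String.ofList (PySem.List.slice cs (some (n - m)) (some n)), true) := by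
        unfold pvEntStep
        exact if_pos ⟨hok, hlt⟩
      rw [List.foldl_cons, hstep]
      rcases ih (1 + C (n - m), n - m,
          String.ofList (PySem.List.slice cs (some (n - m)) (some n)), true) with ⟨hfold, hmin⟩ |
          ⟨m', hm'mem, hm'ok, hm'fold, hm'lt, hm'min, hm'find⟩
      · right
        refine ⟨m, List.mem_cons_self, hok, hfold, hlt, ?_, ?_⟩
        · intro x hx hxok
          rcases List.mem_cons.mp hx with rfl | hx'
          · omega
          · have := hmin x hx' hxok
            have h1 : ((1 + C (n - m), n - m,
              String.ofList (PySem.List.slice cs (some (n - m)) (some n)), true) :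
              Int × Int × String × Bool).1 = 1 + C (n - m) := rfl
            rw [h1] at this
            exact this
        · apply List.find?_cons_of_pos
          rw [hok, beq_self_eq_true]
          rfl
      · right
        have h1 : ((1 + C (n - m), n - m,
            String.ofList (PySem.List.slice cs (some (n - m)) (some n)), true) :
            Int × Int × String × Bool).1 = 1 + C (n - m) := rfl
        rw [h1] at hm'lt
        refine ⟨m', List.mem_cons_of_mem _ hm'mem, hm'ok, hm'fold, by omega, ?_, ?_⟩
        · intro x hx hxok
          rcases List.mem_cons.mp hx with rfl | hx'
          · omega
          · exact hm'min x hx' hxok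
        · rw [List.find?_cons_of_neg, hm'find]
          intro hcontra
          simp only [Bool.and_eq_true, beq_iff_eq] at hcontra
          omega
    · have hstep : pvEntStep cs C n e m = e := by
        unfold pvEntStep
        exact if_neg (fun h => hc ⟨h.1, h.2⟩)
      rw [List.foldl_cons, hstep]
      have hok_imp : pvFullMapping.keys.contains
          (String.ofList (PySem.List.slice cs (some (n - m)) (some n))) = true →
          e.1 ≤ 1 + C (n - m) := by
        intro hok
        by_contra hlt
        exact hc ⟨hok, by omega⟩
      rcases ih e with ⟨hfold, hmin⟩ | ⟨m', hm'mem, hm'ok, hm'fold, hm'lt, hm'min, hm'find⟩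
      · left
        refine ⟨hfold, ?_⟩
        intro x hx hxok
        rcases List.mem_cons.mp hx with rfl | hx'
        · exact hok_imp hxok
        · exact hmin x hx' hxok
      · right
        refine ⟨m', List.mem_cons_of_mem _ hm'mem, hm'ok, hm'fold, hm'lt, ?_, ?_⟩
        · intro x hx hxok
          rcases List.mem_cons.mp hx with rfl | hx'
          · have := hok_imp hxok; omega
          · exact hm'min x hx' hxok
        · rw [List.find?_cons_of_neg, hm'find]
          intro hcontra
          simp only [Bool.and_eq_true, beq_iff_eq] at hcontra
          have h4 := hok_imp hcontra.1
          omega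

-- what B's traceback needs to know about one finished lattice entry
def pvDec (cs : List Char) (N : Int) (lat : List (Int × Int × String × Bool)) (j : Nat) : Prop :=
  ((¬ (lat.getD j pvE4d).1 < N + (lat.getD (j - 1) pvE4d).1) →
      lat.getD j pvE4d = (N + (lat.getD (j - 1) pvE4d).1, (j : Int) - 1,
        String.ofList (PySem.List.slice cs (some ((j : Int) - 1)) (some (j : Int))), false)) ∧
  ((lat.getD j pvE4d).1 < N + (lat.getD (j - 1) pvE4d).1 →
      ∃ m : Int, 1 ≤ m ∧ m ≤ min (j : Int) 3 ∧
        (PySem.List.pyRange 1 (min (j : Int) 3 + 1) 1).find? (fun k =>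
          pvFullMapping.keys.contains
            (String.ofList (PySem.List.slice cs (some ((j : Int) - k)) (some (j : Int))))
          && (1 + (PySem.List.pyGetD lat ((j : Int) - k) pvE4d).1 == (lat.getD j pvE4d).1))
          = some m ∧
        lat.getD j pvE4d
          = (1 + (PySem.List.pyGetD lat ((j : Int) - m) pvE4d).1, (j : Int) - m,
             String.ofList (PySem.List.slice cs (some ((j : Int) - m)) (some (j : Int))), true))

-- the joint invariant of A's lattice fold and B's cost fold
def pvInvC (cs : List Char) (N : Int) (lat : List (Int × Int × String × Bool))
    (dist : List Int) (k : Nat) : Prop :=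
  lat.length = k + 1 ∧ dist.length = k + 1 ∧
  (∀ j : Nat, j ≤ k → dist.getD j 0 = (lat.getD j pvE4d).1) ∧
  (∀ j : Nat, 1 ≤ j → j ≤ k → pvDec cs N lat j)

theorem pv_dec_append (cs : List Char) (N : Int) (lat : List (Int × Int × String × Bool))
    (x : Int × Int × String × Bool) (j : Nat) (hj1 : 1 ≤ j) (hj : j < lat.length)
    (h : pvDec cs N lat j) : pvDec cs N (lat ++ [x]) j := by
  have hgj : (lat ++ [x]).getD j pvE4d = lat.getD j pvE4d :=
    List.getD_append _ _ _ _ hj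
  have hgj1 : (lat ++ [x]).getD (j - 1) pvE4d = lat.getD (j - 1) pvE4d :=
    List.getD_append _ _ _ _ (by omega)
  have hread : ∀ k : Int, 1 ≤ k → k ≤ min (j : Int) 3 →
      PySem.List.pyGetD (lat ++ [x]) ((j : Int) - k) pvE4d
        = PySem.List.pyGetD lat ((j : Int) - k) pvE4d := by
    intro k hk1 hk3
    rw [show (j : Int) - k = ((j - k.toNat : Nat) : Int) by omega,
      PySem.List.pyGetD_natCast, PySem.List.pyGetD_natCast,
      List.getD_append _ _ _ _ (by omega)]
  obtain ⟨hno, hyes⟩ := h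
  constructor
  · intro hcond
    rw [hgj, hgj1] at *
    exact hno hcond
  · intro hcond
    rw [hgj, hgj1] at hcond
    obtain ⟨m, hm1, hm3, hfind, he⟩ := hyes hcond
    refine ⟨m, hm1, hm3, ?_, ?_⟩
    · rw [hgj]
      rw [← hfind]
      apply pv_find?_congr
      intro k hk
      have hkb := PySem.List.mem_pyRange_one.mp hk
      rw [hread k (by omega) (by omega)]
    · rw [hgj, hread m hm1 hm3]
      exact he

theorem pv_stepC (cs : List Char) (lat : List (Int × Int × String × Bool)) (dist : List Int)
    (n : Nat) (hn : 1 ≤ n) (hinv : pvInvC cs (cs.length : Int) lat dist (n - 1)) :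
    pvInvC cs (cs.length : Int) (pvStepA cs (cs.length : Int) lat (n : Int))
      (pvStepD cs (cs.length : Int) dist (n : Int)) n := by
  obtain ⟨hlat, hdist, hpt, hdec⟩ := hinv
  have hlat' : lat.length = n := by omega
  have hdist' : dist.length = n := by omega
  set N : Int := (cs.length : Int) with hN
  -- the two inner ranges coincide
  have hrange : min ((n : Int) + 1) (3 + 1) = min (n : Int) 3 + 1 := by omega
  set ms := PySem.List.pyRange 1 (min (n : Int) 3 + 1) 1 with hms
  have hmem : ∀ m ∈ ms, 1 ≤ m ∧ m ≤ min (n : Int) 3 := by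
    intro m hm
    have := PySem.List.mem_pyRange_one.mp hm
    omega
  -- A's default entry
  have hreadA1 : PySem.List.pyGetD lat ((n : Int) - 1) pvE4d = lat.getD (n - 1) pvE4d := by
    rw [show (n : Int) - 1 = ((n - 1 : Nat) : Int) by omega, PySem.List.pyGetD_natCast]
  set e0 : Int × Int × String × Bool :=
    (N + (PySem.List.pyGetD lat ((n : Int) - 1) pvE4d).1, (n : Int) - 1,
     String.ofList (PySem.List.slice cs (some ((n : Int) - 1)) (some (n : Int))), false) with he0
  -- A's step = lat ++ [entF]
  set entF := ms.foldl (pvEntStep cs (pvC lat) (n : Int)) e0 with hentF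
  have hA : pvStepA cs N lat (n : Int) = lat ++ [entF] := by
    unfold pvStepA
    rw [hrange, ← hms, ← he0, pv_plumb cs lat n hlat' ms
      (fun m hm => ⟨(hmem m hm).1, le_trans (hmem m hm).2 (by omega)⟩) e0]
  -- B's step value equals entF.1
  have hcongrF : ∀ m ∈ ms,
      (if PySem.Set.contains pvSYMBOLS
          (String.ofList (PySem.List.slice cs (some ((n : Int) - m)) (some (n : Int))))
        then some (1 + PySem.List.pyGetD dist ((n : Int) - m) 0) else none)
      = (if pvFullMapping.keys.contains
          (String.ofList (PySem.List.slice cs (some ((n : Int) - m)) (some (n : Int))))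
        then some (1 + pvC lat ((n : Int) - m)) else none) := by
    intro m hm
    obtain ⟨hm1, hm3⟩ := hmem m hm
    have hcastm : (n : Int) - m = ((n - m.toNat : Nat) : Int) := by omega
    have : PySem.List.pyGetD dist ((n : Int) - m) 0 = pvC lat ((n : Int) - m) := by
      unfold pvC
      rw [hcastm, PySem.List.pyGetD_natCast, PySem.List.pyGetD_natCast,
        hpt (n - m.toNat) (by omega)]
    rw [pv_contains_eq, this]
  have hreadB1 : PySem.List.pyGetD dist ((n : Int) - 1) 0 = (lat.getD (n - 1) pvE4d).1 := by
    rw [show (n : Int) - 1 = ((n - 1 : Nat) : Int) by omega, PySem.List.pyGetD_natCast,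
      hpt (n - 1) (by omega)]
  have he01 : e0.1 = N + (lat.getD (n - 1) pvE4d).1 := by rw [he0, hreadA1]
  have hB : pvStepD cs N dist (n : Int) = dist ++ [entF.1] := by
    unfold pvStepD
    rw [← hms, List.filterMap_congr hcongrF, PySem.List.min?_id_cons, Option.getD_some]
    congr 2
    rw [hentF, pv_ent_cost, he01, hreadB1]
  rw [hA, hB]
  -- reassemble the invariant
  have hlen' : (lat ++ [entF]).length = n + 1 := by simp [hlat']
  have hgetn : (lat ++ [entF]).getD n pvE4d = entF := by
    rw [List.getD_append_right _ _ _ _ (by omega), hlat']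
    simp
  have hgetlt : ∀ j : Nat, j < n → (lat ++ [entF]).getD j pvE4d = lat.getD j pvE4d := by
    intro j hj
    exact List.getD_append _ _ _ _ (by omega)
  refine ⟨hlen', by simp [hdist'], ?_, ?_⟩
  · intro j hj
    by_cases hjn : j < n
    · rw [List.getD_append _ _ _ _ (by omega), hgetlt j hjn, hpt j (by omega)]
    · have hjeq : j = n := by omega
      rw [hjeq, hgetn, List.getD_append_right _ _ _ _ (by omega), hdist']
      simp
  · intro j hj1 hjk
    by_cases hjn : j < n
    · exact pv_dec_append cs N lat entF j hj1 (by omega) (hdec j hj1 (by omega))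
    · have hjeq : j = n := by omega
      rw [hjeq]
      -- pvDec at the new index from the characterisation
      have hgetn1 : (lat ++ [entF]).getD (n - 1) pvE4d = lat.getD (n - 1) pvE4d :=
        hgetlt (n - 1) (by omega)
      have hreadlat : ∀ k : Int, 1 ≤ k → k ≤ min (n : Int) 3 →
          PySem.List.pyGetD (lat ++ [entF]) ((n : Int) - k) pvE4d
            = PySem.List.pyGetD lat ((n : Int) - k) pvE4d := by
        intro k hk1 hk3
        rw [show (n : Int) - k = ((n - k.toNat : Nat) : Int) by omega,
          PySem.List.pyGetD_natCast, PySem.List.pyGetD_natCast,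
          List.getD_append _ _ _ _ (by omega)]
      rcases pv_ent_char cs (pvC lat) (n : Int) ms e0 with ⟨hfold, _⟩ |
          ⟨m', hm'mem, hm'ok, hm'fold, hm'lt, _, hm'find⟩
      · -- nothing beat the OOV default
        rw [← hentF] at hfold
        constructor
        · intro _
          rw [hgetn, hgetn1, hfold, he0, hreadA1]
        · intro hcond
          rw [hgetn, hgetn1, hfold, he01] at hcond
          omega
      · rw [← hentF] at hm'fold
        obtain ⟨hm'1, hm'3⟩ := hmem m' hm'mem
        have hfst : ((1 + pvC lat ((n : Int) - m'), (n : Int) - m',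
            String.ofList (PySem.List.slice cs (some ((n : Int) - m')) (some (n : Int))), true) :
            Int × Int × String × Bool).1 = 1 + pvC lat ((n : Int) - m') := rfl
        rw [he01] at hm'lt
        rw [hm'fold] at hgetn hgetn1 hreadlat ⊢
        constructor
        · intro hcond
          rw [hgetn, hgetn1, hfst] at hcond
          omega
        · intro _
          refine ⟨m', hm'1, hm'3, ?_, ?_⟩
          · rw [hgetn, hfst, ← hm'find]
            apply pv_find?_congr
            intro k hk
            obtain ⟨hk1, hk3⟩ := hmem k hk
            rw [hreadlat k hk1 hk3]
            rfl
          · rw [hgetn, hreadlat m' hm'1 hm'3]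
            rfl

-- the paired loop over n = 1 .. N
theorem pv_loopC (cs : List Char) :
    ∀ (d k : Nat) (lat : List (Int × Int × String × Bool)) (dist : List Int),
      k + d = cs.length → pvInvC cs (cs.length : Int) lat dist k →
      pvInvC cs (cs.length : Int)
        ((PySem.List.pyRange ((k : Int) + 1) ((cs.length : Int) + 1) 1).foldl
          (pvStepA cs (cs.length : Int)) lat)
        ((PySem.List.pyRange ((k : Int) + 1) ((cs.length : Int) + 1) 1).foldl
          (pvStepD cs (cs.length : Int)) dist)
        cs.length := by
  intro d
  induction d with
  | zero =>
    intro k lat dist hk hinv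
    have : (k : Int) + 1 = (cs.length : Int) + 1 := by omega
    rw [this]
    simpa [pysem] using (by simpa [← hk] using hinv : pvInvC cs (cs.length : Int) lat dist cs.length)
  | succ d ih =>
    intro k lat dist hk hinv
    have hlt : (k : Int) + 1 < (cs.length : Int) + 1 := by omega
    rw [PySem.List.pyRange_one_cons hlt, List.foldl_cons, List.foldl_cons]
    have hcast : ((k : Int) + 1) = (((k + 1 : Nat)) : Int) := by omega
    rw [hcast]
    have hstep := pv_stepC cs lat dist (k + 1) (by omega) (by simpa using hinv)
    have := ih (k + 1) _ _ (by omega) hstep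
    rw [show (((k + 1 : Nat)) : Int) + 1 = ((k : Int) + 1) + 1 by omega] at this
    exact this

-- with the invariant in hand, A's stored-backpointer walk and B's cost-only traceback agree
theorem pv_trace (cs : List Char) (lat : List (Int × Int × String × Bool)) (dist : List Int)
    (hpt : ∀ j : Nat, j ≤ cs.length → dist.getD j 0 = (lat.getD j pvE4d).1)
    (hdec : ∀ j : Nat, 1 ≤ j → j ≤ cs.length → pvDec cs (cs.length : Int) lat j) :
    ∀ (fuel : Nat) (n : Nat), n ≤ cs.length →
      pvBacktrace lat fuel (n : Int) = pvTraceback cs dist (cs.length : Int) fuel (n : Int) := by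
  intro fuel
  induction fuel with
  | zero => intro n _; rfl
  | succ f ih =>
    intro n hn
    by_cases h0 : (0 : Int) < (n : Int)
    · have hn1 : 1 ≤ n := by exact_mod_cast h0
      have hreadn : PySem.List.pyGetD dist (n : Int) 0 = (lat.getD n pvE4d).1 := by
        rw [PySem.List.pyGetD_natCast, hpt n hn]
      have hreadn1 : PySem.List.pyGetD dist ((n : Int) - 1) 0 = (lat.getD (n - 1) pvE4d).1 := by
        rw [show (n : Int) - 1 = ((n - 1 : Nat) : Int) by omega, PySem.List.pyGetD_natCast,
          hpt (n - 1) (by omega)]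
      have hreadAn : PySem.List.pyGetD lat (n : Int) pvE4d = lat.getD n pvE4d :=
        PySem.List.pyGetD_natCast lat n pvE4d
      obtain ⟨hno, hyes⟩ := hdec n hn1 hn
      by_cases hcond : (lat.getD n pvE4d).1 < (cs.length : Int) + (lat.getD (n - 1) pvE4d).1
      · obtain ⟨m, hm1, hm3, hfind, he⟩ := hyes hcond
        have hfindB : (PySem.List.pyRange 1 (min (n : Int) 3 + 1) 1).find? (fun k =>
            PySem.Set.contains pvSYMBOLS
              (String.ofList (PySem.List.slice cs (some ((n : Int) - k)) (some (n : Int))))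
            && (1 + PySem.List.pyGetD dist ((n : Int) - k) 0 == PySem.List.pyGetD dist (n : Int) 0))
            = some m := by
          rw [← hfind]
          apply pv_find?_congr
          intro k hk
          have hkb := PySem.List.mem_pyRange_one.mp hk
          have hreadk : PySem.List.pyGetD dist ((n : Int) - k) 0
              = (PySem.List.pyGetD lat ((n : Int) - k) pvE4d).1 := by
            rw [show (n : Int) - k = ((n - k.toNat : Nat) : Int) by omega,
              PySem.List.pyGetD_natCast, PySem.List.pyGetD_natCast, hpt (n - k.toNat) (by omega)]
          rw [pv_contains_eq, hreadk, hreadn]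
        have hcondB : PySem.List.pyGetD dist (n : Int) 0
            < (cs.length : Int) + PySem.List.pyGetD dist ((n : Int) - 1) 0 := by
          rw [hreadn, hreadn1]; exact hcond
        have hM : (if PySem.List.pyGetD dist (n : Int) 0
              < (cs.length : Int) + PySem.List.pyGetD dist ((n : Int) - 1) 0 then
            ((PySem.List.pyRange 1 (min (n : Int) 3 + 1) 1).find? (fun k =>
              PySem.Set.contains pvSYMBOLS
                (String.ofList (PySem.List.slice cs (some ((n : Int) - k)) (some (n : Int))))
              && (1 + PySem.List.pyGetD dist ((n : Int) - k) 0
                  == PySem.List.pyGetD dist (n : Int) 0))).getD 1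
          else 1) = m := by
          rw [if_pos hcondB, hfindB]; rfl
        simp only [pvBacktrace, pvTraceback, h0, if_true]
        rw [hM, hreadAn, he]
        have hcast : (n : Int) - m = ((n - m.toNat : Nat) : Int) := by omega
        show _ :: pvBacktrace lat f ((n : Int) - m) = _
        rw [hcast, ih (n - m.toNat) (by omega)]
      · have he := hno hcond
        have hcondB : ¬ PySem.List.pyGetD dist (n : Int) 0
            < (cs.length : Int) + PySem.List.pyGetD dist ((n : Int) - 1) 0 := by
          rw [hreadn, hreadn1]; exact hcond
        have hM : (if PySem.List.pyGetD dist (n : Int) 0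
              < (cs.length : Int) + PySem.List.pyGetD dist ((n : Int) - 1) 0 then
            ((PySem.List.pyRange 1 (min (n : Int) 3 + 1) 1).find? (fun k =>
              PySem.Set.contains pvSYMBOLS
                (String.ofList (PySem.List.slice cs (some ((n : Int) - k)) (some (n : Int))))
              && (1 + PySem.List.pyGetD dist ((n : Int) - k) 0
                  == PySem.List.pyGetD dist (n : Int) 0))).getD 1
          else 1) = 1 := if_neg hcondB
        simp only [pvBacktrace, pvTraceback, h0, if_true]
        rw [hM, hreadAn, he]
        have hcast : (n : Int) - 1 = ((n - 1 : Nat) : Int) := by omega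
        show _ :: pvBacktrace lat f ((n : Int) - 1) = _
        rw [hcast, ih (n - 1) (by omega)]
    · have hz : n = 0 := by omega
      subst hz
      rfl

set_option maxRecDepth 100000 in
theorem pv_seg_eq (s : String) : pvString2symbols s pvFullMapping.keys = pvSegmentB s := by
  have hA : pvString2symbols s pvFullMapping.keys =
      (pvBacktrace
        ((PySem.List.pyRange 1 ((s.toList.length : Int) + 1) 1).foldl
          (pvStepA s.toList (s.toList.length : Int)) [(0, 0, "", true)])
        (s.toList.length + 1) (s.toList.length : Int)).reverse := by
    simp only [pvString2symbols, pv_maxsym_eq]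
    simp only [PySem.Str.len_eq]
    rfl
  have hB : pvSegmentB s =
      (pvTraceback s.toList
        ((PySem.List.pyRange 1 ((s.toList.length : Int) + 1) 1).foldl
          (pvStepD s.toList (s.toList.length : Int)) [0])
        (s.toList.length : Int) (s.toList.length + 1) (s.toList.length : Int)).reverse := by
    simp only [pvSegmentB, pvCosts, PySem.Str.len_eq]
    rfl
  have hbase : pvInvC s.toList (s.toList.length : Int) [(0, 0, "", true)] [0] 0 := by
    refine ⟨rfl, rfl, ?_, ?_⟩
    · intro j hj
      have : j = 0 := by omega
      subst this; rfl
    · intro j hj1 hj0; omega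
  have hloop := pv_loopC s.toList (s.toList.length) 0 _ _ (by omega) hbase
  rw [show (((0 : Nat) : Int) + 1) = (1 : Int) by norm_num] at hloop
  obtain ⟨hlat, hdist, hpt, hdec⟩ := hloop
  rw [hA, hB]
  congr 1
  exact pv_trace s.toList _ _ hpt hdec (s.toList.length + 1) s.toList.length (by omega)

-- ===== VERDICT (by name: the statement is the Claim_ definition above) =====
theorem arpabet2ipa_spec : Claim_equal_arpabet2ipa := by
  intro s gs _
  unfold Spec_arpabet2ipa arpabet2ipa arpabet2ipa_alt
  by_cases h : PySem.Str.isIn " " s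
  · simp only [h, if_true]
    exact pv_conv_fold _ gs
  · simp only [h, if_false, Bool.false_eq_true]
    rw [pv_seg_eq]
    exact pv_conv_fold _ gs
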